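-- pv_equiv track=rewrite | github.com/gagyekum/residency | backend/config/spa.py | _get_content_type
-- ===== SOURCE A (Python) =====
-- def _get_content_type(path: str) -> str:
--     """Get content type based on file extension."""
--     extension_map = {
--         '.html': 'text/html',
--         '.css': 'text/css',
--         '.js': 'application/javascript',
--         '.json': 'application/json',
--         '.png': 'image/png',
--         '.jpg': 'image/jpeg',
--         '.jpeg': 'image/jpeg',
--         '.gif': 'image/gif',
--         '.svg': 'image/svg+xml',
--         '.ico': 'image/x-icon',
--         '.woff': 'font/woff',
--         '.woff2': 'font/woff2',
--         '.ttf': 'font/ttf',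
--         '.eot': 'application/vnd.ms-fontobject',
--     }
--     for ext, content_type in extension_map.items():
--         if path.endswith(ext):
--             return content_type
--     return 'application/octet-stream'
-- ===== SOURCE B (Python) =====
-- def _get_content_type(path: str) -> str:
--     """Get content type based on file extension."""
--     ext = ''
--     found = False
--     for ch in reversed(path):
--         if ch == '.':
--             ext = '.' + ext
--             found = True
--             break
--         ext = ch + ext
--     if not found:
--         return 'application/octet-stream'
--     if ext == '.html':
--         return 'text/html'
--     if ext == '.css':
--         return 'text/css'
--     if ext == '.js':
--         return 'application/javascript'
--     if ext == '.json':
--         return 'application/json'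
--     if ext == '.png':
--         return 'image/png'
--     if ext == '.jpg':
--         return 'image/jpeg'
--     if ext == '.jpeg':
--         return 'image/jpeg'
--     if ext == '.gif':
--         return 'image/gif'
--     if ext == '.svg':
--         return 'image/svg+xml'
--     if ext == '.ico':
--         return 'image/x-icon'
--     if ext == '.woff':
--         return 'font/woff'
--     if ext == '.woff2':
--         return 'font/woff2'
--     if ext == '.ttf':
--         return 'font/ttf'
--     if ext == '.eot':
--         return 'application/vnd.ms-fontobject'
--     return 'application/octet-stream'
-- ===== Notes on version B (the rewrite author's own statement) =====
-- stated objective: alternative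
-- what changed: B extracts the extension once by a single backward scan to the last dot and then dispatches on that exact extension string, instead of A's loop testing path.endswith against every key of the dict.
import Mathlib
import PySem

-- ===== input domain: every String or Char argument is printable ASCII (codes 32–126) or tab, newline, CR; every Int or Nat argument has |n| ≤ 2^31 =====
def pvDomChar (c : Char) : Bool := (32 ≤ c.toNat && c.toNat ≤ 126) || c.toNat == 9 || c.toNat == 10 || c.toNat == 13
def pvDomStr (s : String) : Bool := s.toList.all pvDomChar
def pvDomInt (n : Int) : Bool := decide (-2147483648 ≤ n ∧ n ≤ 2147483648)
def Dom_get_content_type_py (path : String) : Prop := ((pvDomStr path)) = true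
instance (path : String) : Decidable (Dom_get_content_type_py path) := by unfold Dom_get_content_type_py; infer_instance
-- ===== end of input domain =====

-- B extracts the extension once by a single backward scan to the last dot and then
-- dispatches on that exact string, replacing A's endswith loop over all dict keys.

-- ===== PORT A =====
-- the dict literal of A: insertion order, distinct keys
def pvExtPairs : List (String × String) :=
  [(".html", "text/html"), (".css", "text/css"), (".js", "application/javascript"),
   (".json", "application/json"), (".png", "image/png"), (".jpg", "image/jpeg"),
   (".jpeg", "image/jpeg"), (".gif", "image/gif"), (".svg", "image/svg+xml"),
   (".ico", "image/x-icon"), (".woff", "font/woff"), (".woff2", "font/woff2"),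
   (".ttf", "font/ttf"), (".eot", "application/vnd.ms-fontobject")]

-- A's for-loop over extension_map.items(): first key path endswith wins, else the default
def pvFindCT : List (String × String) → String → String
  | [], _ => "application/octet-stream"
  | (ext, ct) :: rest, path =>
      if PySem.Str.endswith path ext then ct else pvFindCT rest path

def get_content_type_py (path : String) : String := pvFindCT pvExtPairs path

-- ===== PORT B =====
-- B's backward loop over reversed(path): prepend chars to ext, stop at the first '.'
-- (= the last dot of path); none = loop ended without `break` (found stays False).
def pvScan : List Char → List Char → Option (List Char)
  | [], _ => none
  | c :: rest, ext => if c = '.' then some ('.' :: ext) else pvScan rest (c :: ext)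

-- B's if-chain on the extracted extension
def pvDispatch (ext : String) : String :=
  if ext = ".html" then "text/html"
  else if ext = ".css" then "text/css"
  else if ext = ".js" then "application/javascript"
  else if ext = ".json" then "application/json"
  else if ext = ".png" then "image/png"
  else if ext = ".jpg" then "image/jpeg"
  else if ext = ".jpeg" then "image/jpeg"
  else if ext = ".gif" then "image/gif"
  else if ext = ".svg" then "image/svg+xml"
  else if ext = ".ico" then "image/x-icon"
  else if ext = ".woff" then "font/woff"
  else if ext = ".woff2" then "font/woff2"
  else if ext = ".ttf" then "font/ttf"
  else if ext = ".eot" then "application/vnd.ms-fontobject"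
  else "application/octet-stream"

def get_content_type_py_alt (path : String) : String :=
  match pvScan path.toList.reverse [] with
  | none => "application/octet-stream"
  | some ext => pvDispatch (String.ofList ext)

-- ===== PRECONDITION & SPEC =====
def Spec_get_content_type_py (path : String) (out : String) : Prop := out = get_content_type_py_alt path
instance (path : String) (out : String) : Decidable (Spec_get_content_type_py path out) := by unfold Spec_get_content_type_py; infer_instance

-- ===== CLAIM =====
def Claim_equal_get_content_type_py : Prop := ∀ (path : String), Dom_get_content_type_py path → Spec_get_content_type_py path (get_content_type_py path)

-- ===== LEMMAS AND PROOFS =====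

-- A's loop as a chain of equality tests: definitionally equal to pvDispatch on pvExtPairs
def pvChain : List (String × String) → String → String
  | [], _ => "application/octet-stream"
  | (k, v) :: rest, s => if s = k then v else pvChain rest s

lemma pv_dispatch_eq_chain (s : String) : pvDispatch s = pvChain pvExtPairs s := rfl

-- the scan on a decomposition at a dot with dot-free tail yields exactly that suffix
lemma pv_scan_decomp (pre t acc : List Char) (hnd : '.' ∉ t) :
    pvScan ((pre ++ '.' :: t).reverse) acc = some ('.' :: (t ++ acc)) := by
  induction t using List.reverseRecOn generalizing acc with
  | nil => simp [pvScan]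
  | append_singleton t' c ih =>
      have hc : c ≠ '.' := by intro h; exact hnd (by simp [h])
      have hnd' : '.' ∉ t' := fun h => hnd (by simp [h])
      have : (pre ++ '.' :: (t' ++ [c])).reverse = c :: (pre ++ '.' :: t').reverse := by
        simp
      rw [this, pvScan, if_neg hc, ih (c :: acc) hnd']
      simp

-- whatever the scan returns is (result minus acc) a suffix of path ++ acc
lemma pv_scan_suffix (l : List Char) (acc e : List Char)
    (h : pvScan l.reverse acc = some e) : e <:+ l ++ acc := by
  induction l using List.reverseRecOn generalizing acc with
  | nil => simp [pvScan] at h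
  | append_singleton l' c ih =>
      rw [List.reverse_append] at h
      simp only [List.reverse_singleton, List.singleton_append] at h
      rw [pvScan] at h
      split_ifs at h with hc
      · subst hc
        obtain rfl : '.' :: acc = e := by simpa using h
        exact ⟨l', by simp⟩
      · have := ih (c :: acc) h
        simpa using this
-- the key shape fact: every key of pvExtPairs is '.' followed by a dot-free tail
lemma pv_keys_shape (p : String × String) (hp : p ∈ pvExtPairs) :
    ∃ t : List Char, p.1.toList = '.' :: t ∧ '.' ∉ t := by
  simp [pvExtPairs] at hp
  rcases hp with h|h|h|h|h|h|h|h|h|h|h|h|h|h <;> subst h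
  · exact ⟨['h','t','m','l'], by decide, by decide⟩
  · exact ⟨['c','s','s'], by decide, by decide⟩
  · exact ⟨['j','s'], by decide, by decide⟩
  · exact ⟨['j','s','o','n'], by decide, by decide⟩
  · exact ⟨['p','n','g'], by decide, by decide⟩
  · exact ⟨['j','p','g'], by decide, by decide⟩
  · exact ⟨['j','p','e','g'], by decide, by decide⟩
  · exact ⟨['g','i','f'], by decide, by decide⟩
  · exact ⟨['s','v','g'], by decide, by decide⟩
  · exact ⟨['i','c','o'], by decide, by decide⟩
  · exact ⟨['w','o','f','f'], by decide, by decide⟩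
  · exact ⟨['w','o','f','f','2'], by decide, by decide⟩
  · exact ⟨['t','t','f'], by decide, by decide⟩
  · exact ⟨['e','o','t'], by decide, by decide⟩

lemma pv_endswith_scan (path k : String) (t : List Char)
    (hk : k.toList = '.' :: t) (hnd : '.' ∉ t)
    (h : PySem.Str.endswith path k = true) :
    pvScan path.toList.reverse [] = some k.toList := by
  rw [PySem.Str.endswith_eq] at h
  obtain ⟨pre, hpre⟩ := (PySem.Chars.endswith_iff _ _).1 h
  rw [← hpre, hk]
  rw [pv_scan_decomp pre t [] hnd]
  simp

lemma pv_scan_endswith (path k : String)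
    (h : pvScan path.toList.reverse [] = some k.toList) :
    PySem.Str.endswith path k = true := by
  have := pv_scan_suffix path.toList [] k.toList h
  rw [PySem.Str.endswith_eq]
  exact (PySem.Chars.endswith_iff _ _).2 (by simpa using this)

-- A's loop agrees with the chain when each key matches iff it equals s
lemma pv_findCT_chain (L : List (String × String)) (path s : String)
    (h : ∀ p ∈ L, PySem.Str.endswith path p.1 = true ↔ p.1 = s) :
    pvFindCT L path = pvChain L s := by
  induction L with
  | nil => rfl
  | cons p rest ih =>
      obtain ⟨k, v⟩ := p
      have hk := h (k, v) (by simp)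
      cases he : PySem.Str.endswith path k with
      | true =>
          have : s = k := (hk.1 he).symm
          subst this
          simp only [pvFindCT, pvChain, he]
          simp
      | false =>
          have hne : s ≠ k := fun hEq => by
            have := hk.2 hEq.symm; rw [he] at this; exact absurd this (by simp)
          simp only [pvFindCT, pvChain, he, if_neg hne, Bool.false_eq_true, if_false]
          exact ih (fun q hq => h q (by simp [hq]))

-- A's loop falls through when no key matches
lemma pv_findCT_none (L : List (String × String)) (path : String)
    (h : ∀ p ∈ L, PySem.Str.endswith path p.1 = false) :
    pvFindCT L path = "application/octet-stream" := by
  induction L with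
  | nil => rfl
  | cons p rest ih =>
      obtain ⟨k, v⟩ := p
      have := h (k, v) (by simp)
      simp only [pvFindCT, this, Bool.false_eq_true, if_false]
      exact ih (fun q hq => h q (by simp [hq]))

lemma pv_mk_toList (s : String) : String.ofList s.toList = s :=
  String.ofList_toList

-- ===== VERDICT =====
theorem get_content_type_py_spec : Claim_equal_get_content_type_py := by
  intro path _
  unfold Spec_get_content_type_py get_content_type_py get_content_type_py_alt
  cases hext : pvScan path.toList.reverse [] with
  | none =>
      apply pv_findCT_none
      intro p hp
      obtain ⟨t, hk, hnd⟩ := pv_keys_shape p hp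
      by_contra hne
      have he : PySem.Str.endswith path p.1 = true := by
        cases h : PySem.Str.endswith path p.1
        · exact absurd h hne
        · rfl
      have := pv_endswith_scan path p.1 t hk hnd he
      rw [hext] at this; exact absurd this (by simp)
  | some e =>
      show pvFindCT pvExtPairs path = pvDispatch (String.ofList e)
      rw [pv_dispatch_eq_chain]
      apply pv_findCT_chain
      intro p hp
      obtain ⟨t, hk, hnd⟩ := pv_keys_shape p hp
      constructor
      · intro he
        have := pv_endswith_scan path p.1 t hk hnd he
        rw [hext] at this
        have : p.1.toList = e := by injection this with h; exact h.symm
        rw [← this, pv_mk_toList]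
      · intro hEq
        apply pv_scan_endswith
        rw [hext, hEq]
        simp
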